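-- pv_equiv track=rewrite | github.com/heeheejj/Algorithm_BOJ | boj/math/21275.py | transform
-- ===== SOURCE A (Python) =====
-- def transform(x, n):
--   result = 0
--   for i in range(len(x)):
--     if ord(x[i]) >= ord('a'):
--       result += (ord(x[i]) - ord('a') + 10) * n**(len(x) - 1 - i)
--     else:
--       result += int(x[i])*n**(len(x) - 1 - i)
--   return result
-- ===== SOURCE B (Python) =====
-- def transform(x, n):
--     result = 0
--     for c in x:
--         result = result * n + (ord(c) - 87 if ord(c) >= 97 else int(c))
--     return result
-- ===== Notes on version B (the rewrite author's own statement) =====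
-- stated objective: faster
-- what changed: Replaces the positional sum that recomputes n**(len(x)-1-i) for every character with a single-pass Horner evaluation result = result*n + digit.
import Mathlib
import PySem

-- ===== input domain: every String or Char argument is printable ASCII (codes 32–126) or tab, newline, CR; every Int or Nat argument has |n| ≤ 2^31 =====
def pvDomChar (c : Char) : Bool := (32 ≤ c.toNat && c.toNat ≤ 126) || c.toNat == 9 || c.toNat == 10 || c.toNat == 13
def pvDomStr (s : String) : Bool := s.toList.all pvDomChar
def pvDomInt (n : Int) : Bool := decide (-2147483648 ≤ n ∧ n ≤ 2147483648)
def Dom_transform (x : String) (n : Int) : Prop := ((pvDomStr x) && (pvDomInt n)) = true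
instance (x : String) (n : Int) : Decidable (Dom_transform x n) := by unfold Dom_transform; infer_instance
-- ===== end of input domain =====

-- B replaces the per-position power computation with a one-pass Horner evaluation (faster: asymptotic).


-- ===== PORT A =====
-- digit of c in A: first branch ord(c)-ord('a')+10; else int(c), which on the
-- digits '0'..'9' admitted by Pre_ is exactly ord(c)-48 (exact there; Pre_ excludes the rest).
def pvDigitA (c : Char) : Int :=
  if 97 ≤ c.toNat then (c.toNat : Int) - 97 + 10 else (c.toNat : Int) - 48

def transform (x : String) (n : Int) : Int :=
  let cs := x.toList
  (List.range cs.length).foldl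
    (fun result i => result + pvDigitA (cs.getD i ' ') * n ^ (cs.length - 1 - i)) 0

-- ===== PORT B =====
def transform_alt (x : String) (n : Int) : Int :=
  x.toList.foldl
    (fun result c =>
      result * n + (if 97 ≤ c.toNat then (c.toNat : Int) - 87 else (c.toNat : Int) - 48)) 0

-- ===== PRECONDITION & SPEC =====
-- Pre_ excludes exactly the strings with a character below 'a' that is not a decimal
-- digit: there Python's int(x[i]) raises ValueError.
def Pre_transform (x : String) (n : Int) : Prop :=
  (x.toList.all (fun c => 97 ≤ c.toNat || (48 ≤ c.toNat && c.toNat ≤ 57))) = true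
instance (x : String) (n : Int) : Decidable (Pre_transform x n) := by
  unfold Pre_transform; infer_instance
def pvWitness_transform : String × Int := ("a1", 16)

def Spec_transform (x : String) (n : Int) (out : Int) : Prop := out = transform_alt x n
instance (x : String) (n : Int) (out : Int) : Decidable (Spec_transform x n out) := by unfold Spec_transform; infer_instance

-- ===== CLAIM (what is proved, stated in full; the proofs are below) =====
def Claim_equal_transform : Prop := ∀ (x : String) (n : Int), Dom_transform x n → Pre_transform x n → Spec_transform x n (transform x n)

-- ===== LEMMAS AND PROOFS =====

-- A's accumulating loop over range is the positional sum.
lemma foldl_range_add (g : Nat → Int) (a : Int) (m : Nat) :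
    (List.range m).foldl (fun r i => r + g i) a = a + ∑ i ∈ Finset.range m, g i := by
  induction m generalizing a with
  | zero => simp
  | succ m ih => simp [List.range_succ, Finset.sum_range_succ, ih]; ring

-- Horner's loop computes the same positional sum (with any starting accumulator).
lemma horner_eq (d : Char → Int) (n : Int) (cs : List Char) :
    ∀ a : Int,
      cs.foldl (fun r c => r * n + d c) a
        = a * n ^ cs.length
          + ∑ i ∈ Finset.range cs.length, d (cs.getD i ' ') * n ^ (cs.length - 1 - i) := by
  induction cs with
  | nil => intro a; simp
  | cons c t ih =>
      intro a
      have hsum :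
          (∑ i ∈ Finset.range (t.length + 1),
              d ((c :: t).getD i ' ') * n ^ (t.length + 1 - 1 - i))
            = d c * n ^ t.length
              + ∑ i ∈ Finset.range t.length, d (t.getD i ' ') * n ^ (t.length - 1 - i) := by
        rw [Finset.sum_range_succ']
        simp only [List.getD_cons_succ, List.getD_cons_zero]
        have : t.length + 1 - 1 - 0 = t.length := by omega
        rw [this]
        have hidx : ∀ i, t.length + 1 - 1 - (i + 1) = t.length - 1 - i := by omega
        rw [add_comm]
        congr 1
        exact Finset.sum_congr rfl (fun i _ => by rw [hidx i])
      calc (c :: t).foldl (fun r c => r * n + d c) a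
          = t.foldl (fun r c => r * n + d c) (a * n + d c) := by simp
        _ = (a * n + d c) * n ^ t.length
              + ∑ i ∈ Finset.range t.length, d (t.getD i ' ') * n ^ (t.length - 1 - i) := ih _
        _ = a * n ^ (c :: t).length
              + ∑ i ∈ Finset.range (t.length + 1),
                  d ((c :: t).getD i ' ') * n ^ (t.length + 1 - 1 - i) := by
            rw [hsum]; simp [List.length_cons, pow_succ]; ring
        _ = _ := by simp

-- A's digit and B's digit agree on every character.
lemma digit_agree (c : Char) :
    (if 97 ≤ c.toNat then (c.toNat : Int) - 87 else (c.toNat : Int) - 48) = pvDigitA c := by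
  unfold pvDigitA; split <;> ring

-- ===== VERDICT (by name: the statement is the Claim_ definition above) =====
theorem transform_spec : Claim_equal_transform := by
  intro x n _ _
  unfold Spec_transform transform transform_alt
  simp only [digit_agree]
  rw [horner_eq, foldl_range_add]
  simp
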